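-- pv_equiv track=rewrite | github.com/baldrock22/pgpr-gene-detector | app.py | compute_consensus_from_aligned
-- ===== SOURCE A (Python) =====
-- from collections import Counter
--
-- def compute_consensus_from_aligned(aligned_seqs):
--     if not aligned_seqs:
--         return ""
--     max_len = max(len(seq) for seq in aligned_seqs)
--     consensus = []
--     for i in range(max_len):
--         column = [seq[i] for seq in aligned_seqs if i < len(seq)]
--         most_common = Counter(column).most_common(1)[0][0]
--         consensus.append(most_common)
--     return ''.join(consensus)
-- ===== SOURCE B (Python) =====
-- from collections import Counter
--
-- def compute_consensus_from_aligned(aligned_seqs):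
--     if not aligned_seqs:
--         return ""
--     max_len = max(len(seq) for seq in aligned_seqs)
--     counters = [Counter() for _ in range(max_len)]
--     for seq in aligned_seqs:
--         for c, ch in zip(counters, seq):
--             c[ch] += 1
--     return ''.join(c.most_common(1)[0][0] for c in counters)
-- ===== Notes on version B (the rewrite author's own statement) =====
-- stated objective: alternative
-- what changed: Instead of rebuilding a transient column list and a fresh Counter for every column index (column-major), B makes one row-major pass over the sequences, incrementing a pre-allocated per-column Counter table via zip, then reads one winner per counter; same tie-break (first-encountered character in sequence order).
import Mathlib
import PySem

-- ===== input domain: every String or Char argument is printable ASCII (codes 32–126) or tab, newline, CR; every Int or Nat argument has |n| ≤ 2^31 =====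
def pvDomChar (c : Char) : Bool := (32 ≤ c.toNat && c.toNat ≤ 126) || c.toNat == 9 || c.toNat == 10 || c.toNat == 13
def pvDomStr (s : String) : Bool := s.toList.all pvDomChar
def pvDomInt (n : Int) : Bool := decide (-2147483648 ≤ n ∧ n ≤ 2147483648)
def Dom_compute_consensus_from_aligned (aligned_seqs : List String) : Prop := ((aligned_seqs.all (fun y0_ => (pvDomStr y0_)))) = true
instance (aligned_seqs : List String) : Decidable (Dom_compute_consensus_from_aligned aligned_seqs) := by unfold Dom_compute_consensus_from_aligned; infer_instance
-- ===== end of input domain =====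

-- B replaces A's column-major rebuild (a fresh column list and Counter per index) by one
-- row-major pass over the sequences into a pre-allocated per-column Counter table (alternative
-- decomposition, same cost class); the return value is proved identical.

-- ===== PORT A =====

-- Counter(col).most_common(1)[0][0]: first item (insertion order) with maximal count
-- (heapq.nlargest is stable); ' ' is a junk default for the empty Counter (A raises there,
-- but that branch is unreachable: every column index below max_len has at least one char).
def pvMC1 (d : PySem.Dict Char Int) : Char :=
  match PySem.List.max? d.items (fun p => p.2) with
  | some p => p.1
  | none => ' '

def compute_consensus_from_aligned (aligned_seqs : List String) : String :=
  match aligned_seqs with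
  | [] => ""
  | s0 :: rest =>
    -- max_len = max(len(seq) for seq in aligned_seqs), as a running-max loop
    let max_len := rest.foldl (fun m t => Nat.max m t.toList.length) s0.toList.length
    let consensus := (List.range max_len).map (fun i =>
      let column := (s0 :: rest).filterMap (fun s =>
        if i < s.toList.length then s.toList[i]? else none)
      pvMC1 (PySem.Dict.counter column))
    String.ofList consensus

-- ===== PORT B =====

-- for c, ch in zip(counters, seq): c[ch] += 1
def pvZipUpdate : List (PySem.Dict Char Int) → List Char → List (PySem.Dict Char Int)
  | cs, [] => cs
  | [], _ :: _ => []
  | c :: cs, ch :: chs => c.modify ch 0 (· + 1) :: pvZipUpdate cs chs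

def compute_consensus_from_aligned_alt (aligned_seqs : List String) : String :=
  match aligned_seqs with
  | [] => ""
  | s0 :: rest =>
    let max_len := rest.foldl (fun m t => Nat.max m t.toList.length) s0.toList.length
    let counters := (s0 :: rest).foldl (fun cs s => pvZipUpdate cs s.toList)
      (List.replicate max_len PySem.Dict.empty)
    String.ofList (counters.map pvMC1)

-- ===== PRECONDITION & SPEC =====
def Spec_compute_consensus_from_aligned (aligned_seqs : List String) (out : String) : Prop := out = compute_consensus_from_aligned_alt aligned_seqs
instance (aligned_seqs : List String) (out : String) : Decidable (Spec_compute_consensus_from_aligned aligned_seqs out) := by unfold Spec_compute_consensus_from_aligned; infer_instance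

-- ===== CLAIM (what is proved, stated in full; the proofs are below) =====
def Claim_equal_compute_consensus_from_aligned : Prop := ∀ (aligned_seqs : List String), Dom_compute_consensus_from_aligned aligned_seqs → Spec_compute_consensus_from_aligned aligned_seqs (compute_consensus_from_aligned aligned_seqs)

-- ===== LEMMAS AND PROOFS =====

theorem pvZipUpdate_length (cs : List (PySem.Dict Char Int)) (l : List Char) :
    (pvZipUpdate cs l).length = cs.length := by
  induction cs generalizing l with
  | nil => cases l <;> simp [pvZipUpdate]
  | cons c cs ih => cases l <;> simp [pvZipUpdate, ih]

theorem pvZipUpdate_getElem?_some (cs : List (PySem.Dict Char Int)) (l : List Char)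
    (i : Nat) (ch : Char) (h : l[i]? = some ch) :
    (pvZipUpdate cs l)[i]? = cs[i]?.map (fun d => d.modify ch 0 (· + 1)) := by
  induction cs generalizing l i with
  | nil => cases l <;> simp [pvZipUpdate]
  | cons c cs ih =>
    cases l with
    | nil => simp at h
    | cons ch' l' =>
      cases i with
      | zero => simp_all [pvZipUpdate]
      | succ j => simp_all [pvZipUpdate]

theorem pvZipUpdate_getElem?_none (cs : List (PySem.Dict Char Int)) (l : List Char)
    (i : Nat) (h : l[i]? = none) :
    (pvZipUpdate cs l)[i]? = cs[i]? := by
  induction cs generalizing l i with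
  | nil => cases l <;> simp [pvZipUpdate]
  | cons c cs ih =>
    cases l with
    | nil => simp [pvZipUpdate]
    | cons ch' l' =>
      cases i with
      | zero => simp at h
      | succ j => simp_all [pvZipUpdate]

def pvColAt (seqs : List String) (i : Nat) : List Char :=
  seqs.filterMap (fun s => if i < s.toList.length then s.toList[i]? else none)

theorem pvFold_length (seqs : List String) (cs : List (PySem.Dict Char Int)) :
    (seqs.foldl (fun cs s => pvZipUpdate cs s.toList) cs).length = cs.length := by
  induction seqs generalizing cs with
  | nil => rfl
  | cons s rest ih => simp [List.foldl_cons, ih, pvZipUpdate_length]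

theorem pvFold_getElem? (seqs : List String) (i : Nat) (cs : List (PySem.Dict Char Int))
    (d : PySem.Dict Char Int) (h : cs[i]? = some d) :
    (seqs.foldl (fun cs s => pvZipUpdate cs s.toList) cs)[i]?
      = some ((pvColAt seqs i).foldl (fun d ch => d.modify ch 0 (· + 1)) d) := by
  induction seqs generalizing cs d with
  | nil => simpa [pvColAt] using h
  | cons s rest ih =>
    by_cases hlt : i < s.toList.length
    · obtain ⟨ch, hch⟩ : ∃ ch, s.toList[i]? = some ch :=
        ⟨s.toList[i], List.getElem?_eq_getElem hlt⟩
      have hstep := pvZipUpdate_getElem?_some cs s.toList i ch hch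
      have hcol : pvColAt (s :: rest) i = ch :: pvColAt rest i := by
        unfold pvColAt
        rw [List.filterMap_cons, if_pos hlt, hch]
      rw [List.foldl_cons, ih _ _ (by rw [hstep, h]; rfl), hcol, List.foldl_cons]
    · have hnone : s.toList[i]? = none := List.getElem?_eq_none (by omega)
      have hstep := pvZipUpdate_getElem?_none cs s.toList i hnone
      have hcol : pvColAt (s :: rest) i = pvColAt rest i := by
        unfold pvColAt
        rw [List.filterMap_cons, if_neg hlt]
      rw [List.foldl_cons, ih _ _ (by rw [hstep, h]), hcol]

-- ===== VERDICT (by name: the statement is the Claim_ definition above) =====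
theorem compute_consensus_from_aligned_spec : Claim_equal_compute_consensus_from_aligned := by
  intro aligned_seqs _
  unfold Spec_compute_consensus_from_aligned
  cases aligned_seqs with
  | nil => rfl
  | cons s0 rest =>
    simp only [compute_consensus_from_aligned, compute_consensus_from_aligned_alt]
    set M := rest.foldl (fun m t => Nat.max m t.toList.length) s0.toList.length with hM
    set counters := (s0 :: rest).foldl (fun cs s => pvZipUpdate cs s.toList)
      (List.replicate M PySem.Dict.empty) with hcnt
    have hlen : counters.length = M := by
      rw [hcnt, pvFold_length, List.length_replicate]
    congr 1
    apply List.ext_getElem?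
    intro i
    by_cases hi : i < M
    · have hrep : (List.replicate M (PySem.Dict.empty : PySem.Dict Char Int))[i]?
          = some PySem.Dict.empty := by
        simp [hi]
      have hci := pvFold_getElem? (s0 :: rest) i _ _ hrep
      rw [← hcnt] at hci
      have hcol : PySem.Dict.counter (pvColAt (s0 :: rest) i)
          = (pvColAt (s0 :: rest) i).foldl (fun d ch => d.modify ch 0 (· + 1))
              PySem.Dict.empty := PySem.Dict.counter_eq_foldl _
      have hl : (List.range M)[i]? = some i := by simp [hi]
      rw [List.getElem?_map, List.getElem?_map, hl, hci, ← hcol]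
      rfl
    · have h1 : ((List.range M).map (fun i =>
          pvMC1 (PySem.Dict.counter ((s0 :: rest).filterMap (fun s =>
            if i < s.toList.length then s.toList[i]? else none)))))[i]? = none := by
        simp [Nat.le_of_not_lt hi]
      have h2 : (counters.map pvMC1)[i]? = none := by
        simp [hlen, Nat.le_of_not_lt hi]
      rw [h1, h2]
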